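-- pv_equiv track=rewrite | github.com/jborlik/AdventOfCode2015 | day16.py | calculateMatchValueWithRanges
-- ===== SOURCE A (Python) =====
-- def calculateMatchValueWithRanges(incompleteObject, knownObject):
--     """Calculate an integer match value, scoring +1 for each match"""
--     matchvalue = 0
--     for catkey, catval in incompleteObject.items():
--         if (catkey == 'cats' or catkey=='trees'):
--             if catval > knownObject[catkey]:
--                 matchvalue += 1
--         elif (catkey == 'pomeranians' or catkey=='goldfish'):
--             if catval < knownObject[catkey]:
--                 matchvalue += 1
--         else:
--             if knownObject[catkey] == catval:
--                 matchvalue += 1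
--     return matchvalue
-- ===== SOURCE B (Python) =====
-- _DIR = {'cats': 1, 'trees': 1, 'pomeranians': -1, 'goldfish': -1}
--
--
-- def _sign(x):
--     return (x > 0) - (x < 0)
--
--
-- def calculateMatchValueWithRanges(incompleteObject, knownObject):
--     """Calculate an integer match value, scoring +1 for each match"""
--     def go(items):
--         if not items:
--             return 0
--         k, v = items[0]
--         hit = _sign(v - knownObject[k]) == _DIR.get(k, 0)
--         return int(hit) + go(items[1:])
--     return go(list(incompleteObject.items()))
-- ===== Notes on version B (the rewrite author's own statement) =====
-- stated objective: alternative
-- what changed: The three-way if/elif/else comparison loop becomes an arithmetical formulation: each key is reduced to a required sign (+1/-1/0 from a direction table) and a match is sign(catval - known) == that direction, counted by structural recursion on the item list instead of an accumulator loop.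
import Mathlib
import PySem

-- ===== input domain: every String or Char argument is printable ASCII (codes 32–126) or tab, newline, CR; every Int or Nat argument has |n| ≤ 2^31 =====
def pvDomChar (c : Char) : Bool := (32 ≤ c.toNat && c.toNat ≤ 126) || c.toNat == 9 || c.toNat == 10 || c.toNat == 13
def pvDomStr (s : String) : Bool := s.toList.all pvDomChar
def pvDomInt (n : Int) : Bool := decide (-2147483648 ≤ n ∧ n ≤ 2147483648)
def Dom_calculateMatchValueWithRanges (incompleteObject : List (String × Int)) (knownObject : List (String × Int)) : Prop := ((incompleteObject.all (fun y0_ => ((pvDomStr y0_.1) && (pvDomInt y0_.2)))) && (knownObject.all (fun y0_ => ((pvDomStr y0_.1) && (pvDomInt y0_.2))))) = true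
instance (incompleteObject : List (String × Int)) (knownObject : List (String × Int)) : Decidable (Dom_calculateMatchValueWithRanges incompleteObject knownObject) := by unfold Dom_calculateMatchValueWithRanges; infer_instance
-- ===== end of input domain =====

-- B replaces A's three-way if/elif/else accumulator loop by an arithmetical formulation:
-- each key maps to a required sign (+1/-1/0) and a match is sign(catval-known) == that
-- direction, counted by structural recursion on the items (objective: alternative).
-- ===== PORT A =====
-- knownObject[catkey] raises KeyError when the key is absent; Pre_ excludes that, so the
-- port reads the value with getD 0 (the default is never reached inside Pre_).
def calculateMatchValueWithRanges (incompleteObject : List (String × Int)) (knownObject : List (String × Int)) : Int :=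
  incompleteObject.foldl (fun matchvalue kv =>
    let catkey := kv.1
    let catval := kv.2
    if catkey == "cats" || catkey == "trees" then
      if catval > (PySem.Dict.mk knownObject).getD catkey 0 then matchvalue + 1 else matchvalue
    else if catkey == "pomeranians" || catkey == "goldfish" then
      if catval < (PySem.Dict.mk knownObject).getD catkey 0 then matchvalue + 1 else matchvalue
    else
      if (PySem.Dict.mk knownObject).getD catkey 0 == catval then matchvalue + 1 else matchvalue) 0

-- ===== PORT B =====
-- the _DIR direction table of Source B
def pvDir : List (String × Int) :=
  [("cats", 1), ("trees", 1), ("pomeranians", -1), ("goldfish", -1)]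

-- _sign of Source B: (x > 0) - (x < 0)
def pvSign (x : Int) : Int :=
  (if x > 0 then (1 : Int) else 0) - (if x < 0 then (1 : Int) else 0)

-- the inner recursive go of Source B (as in A's port, the absent-key KeyError is excluded by Pre_)
def pvGo (knownObject : List (String × Int)) : List (String × Int) → Int
  | [] => 0
  | (k, v) :: rest =>
      (if pvSign (v - (PySem.Dict.mk knownObject).getD k 0) == (PySem.Dict.mk pvDir).getD k 0
       then (1 : Int) else 0) + pvGo knownObject rest

def calculateMatchValueWithRanges_alt (incompleteObject : List (String × Int)) (knownObject : List (String × Int)) : Int :=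
  pvGo knownObject incompleteObject

-- ===== PRECONDITION & SPEC =====
-- Pre_ excludes (i) incompleteObject keys missing from knownObject, where A raises KeyError,
-- and (ii) duplicate keys in either association list, where the Python-dict collapse of
-- duplicates makes the list-level behaviour an accident of the encoding.
def Pre_calculateMatchValueWithRanges (incompleteObject : List (String × Int)) (knownObject : List (String × Int)) : Prop :=
  (incompleteObject.map Prod.fst).Nodup ∧ (knownObject.map Prod.fst).Nodup ∧
  ∀ kv ∈ incompleteObject, kv.1 ∈ knownObject.map Prod.fst
instance (incompleteObject : List (String × Int)) (knownObject : List (String × Int)) : Decidable (Pre_calculateMatchValueWithRanges incompleteObject knownObject) := by unfold Pre_calculateMatchValueWithRanges; infer_instance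

def pvWitness_calculateMatchValueWithRanges : (List (String × Int)) × (List (String × Int)) :=
  ([("cats", 5), ("goldfish", 2), ("samoyeds", 7)], [("cats", 3), ("goldfish", 4), ("samoyeds", 7)])

def Spec_calculateMatchValueWithRanges (incompleteObject : List (String × Int)) (knownObject : List (String × Int)) (out : Int) : Prop := out = calculateMatchValueWithRanges_alt incompleteObject knownObject
instance (incompleteObject : List (String × Int)) (knownObject : List (String × Int)) (out : Int) : Decidable (Spec_calculateMatchValueWithRanges incompleteObject knownObject out) := by unfold Spec_calculateMatchValueWithRanges; infer_instance

-- ===== CLAIM (what is proved, stated in full; the proofs are below) =====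
def Claim_equal_calculateMatchValueWithRanges : Prop := ∀ (incompleteObject : List (String × Int)) (knownObject : List (String × Int)), Dom_calculateMatchValueWithRanges incompleteObject knownObject → Pre_calculateMatchValueWithRanges incompleteObject knownObject → Spec_calculateMatchValueWithRanges incompleteObject knownObject (calculateMatchValueWithRanges incompleteObject knownObject)

-- ===== LEMMAS AND PROOFS =====

-- A's fold from accumulator m equals m plus B's sign-recursion count.
theorem pvFold_eq_go (knownObject : List (String × Int)) :
    ∀ (l : List (String × Int)) (m : Int),
      l.foldl (fun matchvalue kv =>
        let catkey := kv.1
        let catval := kv.2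
        if catkey == "cats" || catkey == "trees" then
          if catval > (PySem.Dict.mk knownObject).getD catkey 0 then matchvalue + 1 else matchvalue
        else if catkey == "pomeranians" || catkey == "goldfish" then
          if catval < (PySem.Dict.mk knownObject).getD catkey 0 then matchvalue + 1 else matchvalue
        else
          if (PySem.Dict.mk knownObject).getD catkey 0 == catval then matchvalue + 1 else matchvalue) m
      = m + pvGo knownObject l := by
  intro l
  induction l with
  | nil => simp [pvGo]
  | cons kv t ih =>
    obtain ⟨k, v⟩ := kv
    intro m
    simp only [List.foldl_cons, pvGo, ih]
    set w := (PySem.Dict.mk knownObject).getD k 0 with hw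
    by_cases h1 : k = "cats"
    · subst h1; simp [pvDir, pvSign, PySem.Dict.getD, PySem.Dict.get?]
      split_ifs <;> omega
    · by_cases h2 : k = "trees"
      · subst h2; simp [pvDir, pvSign, PySem.Dict.getD, PySem.Dict.get?]
        split_ifs <;> omega
      · by_cases h3 : k = "pomeranians"
        · subst h3; simp [pvDir, pvSign, PySem.Dict.getD, PySem.Dict.get?]
          split_ifs <;> omega
        · by_cases h4 : k = "goldfish"
          · subst h4; simp [pvDir, pvSign, PySem.Dict.getD, PySem.Dict.get?]
            split_ifs <;> omega
          · simp [pvDir, pvSign, PySem.Dict.getD, PySem.Dict.get?,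
              h1, h2, h3, h4, Ne.symm h1, Ne.symm h2, Ne.symm h3, Ne.symm h4]
            split_ifs <;> omega

-- ===== VERDICT (by name: the statement is the Claim_ definition above) =====
theorem calculateMatchValueWithRanges_spec : Claim_equal_calculateMatchValueWithRanges := by
  intro inc kn _ _
  unfold Spec_calculateMatchValueWithRanges calculateMatchValueWithRanges calculateMatchValueWithRanges_alt
  simpa using pvFold_eq_go kn inc 0
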